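-- pv_equiv track=rewrite | github.com/cynthia-love/leetcode | 3. basic algorithm/chapter 02/homework/solution-33.py | f
-- ===== SOURCE A (Python) =====
-- def f(params):
--     for i in range(1, len(params), 2):
--         params[i] -= 1
--     res = []
--     for i in range(0, len(params), 2):
--         if params[i+1] < 0: continue
--         res.extend([params[i], params[i+1]])
--     return res
-- ===== SOURCE B (Python) =====
-- def f(params):
--     # Divide and conquer: split at an even midpoint, solve each half, concatenate.
--     # Return value only: A mutates odd indices of params in place, B does not.
--     n = len(params)
--     if n < 2:
--         return []
--     if n == 2:
--         a, b = params[0], params[1] - 1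
--         return [] if b < 0 else [a, b]
--     mid = n // 2
--     if mid % 2 == 1:
--         mid += 1
--     return f(params[:mid]) + f(params[mid:])
-- ===== Notes on version B (the rewrite author's own statement) =====
-- stated objective: alternative
-- what changed: Replaced A's two staged index loops (an in-place decrement pass over odd indices, then an index-arithmetic pair scan appending to res) with a divide-and-conquer recursion that splits the list at an even midpoint, solves each half independently and concatenates the halves' results; B does not mutate its argument.
import Mathlib
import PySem

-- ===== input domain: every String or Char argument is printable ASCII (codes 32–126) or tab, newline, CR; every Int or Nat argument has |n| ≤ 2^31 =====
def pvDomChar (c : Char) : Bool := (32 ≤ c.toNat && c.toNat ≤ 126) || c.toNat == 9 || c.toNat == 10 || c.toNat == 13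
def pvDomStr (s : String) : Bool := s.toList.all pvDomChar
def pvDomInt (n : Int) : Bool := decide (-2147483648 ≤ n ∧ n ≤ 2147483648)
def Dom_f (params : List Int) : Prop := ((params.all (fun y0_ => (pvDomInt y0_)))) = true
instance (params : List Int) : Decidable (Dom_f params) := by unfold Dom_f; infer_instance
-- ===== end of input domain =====

-- B replaces A's two staged index loops by a divide-and-conquer recursion splitting the
-- list at an even midpoint (RETURN VALUE only: A mutates `params` in place, B does not).

-- ===== PORT A =====
-- first loop: for i in range(1, len(params), 2): params[i] -= 1
def fDecStep (q : List Int) (i : Int) : List Int :=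
  PySem.List.pySetD q i (PySem.List.pyGetD q i 0 - 1)

def fDec (params : List Int) : List Int :=
  (PySem.List.pyRange 1 (params.length : Int) 2).foldl fDecStep params

-- second loop body: if params[i+1] < 0: continue; res.extend([params[i], params[i+1]])
def fResStep (ps : List Int) (res : List Int) (i : Int) : List Int :=
  if PySem.List.pyGetD ps (i + 1) 0 < 0 then res
  else res ++ [PySem.List.pyGetD ps i 0, PySem.List.pyGetD ps (i + 1) 0]

def f (params : List Int) : List Int :=
  let ps := fDec params
  (PySem.List.pyRange 0 (ps.length : Int) 2).foldl (fResStep ps) []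

-- ===== PORT B =====
-- mid = n // 2; if mid % 2 == 1: mid += 1
def fMid (n : Nat) : Nat := if (n / 2) % 2 = 1 then n / 2 + 1 else n / 2

-- Source B's divide and conquer; params[:mid] / params[mid:] with 0 ≤ mid ≤ len(params)
-- are exactly List.take mid / List.drop mid (nonnegative in-range slice bounds).
-- The fuel argument (list length, strictly decreasing at each split) only makes the
-- recursion structural; it never changes the computed value.
def fAltGo : Nat → List Int → List Int
  | 0, _ => []
  | _ + 1, [] => []
  | _ + 1, [_] => []
  | _ + 1, [a, b] => if b - 1 < 0 then [] else [a, b - 1]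
  | fuel + 1, a :: b :: c :: t =>
      fAltGo fuel ((a :: b :: c :: t).take (fMid (a :: b :: c :: t).length))
        ++ fAltGo fuel ((a :: b :: c :: t).drop (fMid (a :: b :: c :: t).length))

def f_alt (params : List Int) : List Int := fAltGo params.length params

-- ===== PRECONDITION & SPEC =====
-- Pre_ excludes odd-length lists, on which A raises IndexError (params[i+1] out of range).
def Pre_f (params : List Int) : Prop := params.length % 2 = 0
instance (params : List Int) : Decidable (Pre_f params) := by unfold Pre_f; infer_instance
def pvWitness_f : List Int := [3, 1, 4, 0]

def Spec_f (params : List Int) (out : List Int) : Prop := out = f_alt params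
instance (params : List Int) (out : List Int) : Decidable (Spec_f params out) := by unfold Spec_f; infer_instance

-- ===== CLAIM (what is proved, stated in full; the proofs are below) =====
def Claim_equal_f : Prop := ∀ (params : List Int), Dom_f params → Pre_f params → Spec_f params (f params)

-- ===== LEMMAS AND PROOFS =====

theorem pyGetD_cons_cons_of_two_le (x y : Int) (t : List Int) {i : Int} (h : 2 ≤ i) :
    PySem.List.pyGetD (x :: y :: t) i 0 = PySem.List.pyGetD t (i - 2) 0 := by
  simp only [PySem.List.pyGetD, PySem.List.pyGet?, PySem.List.pyIdx?]
  have h0 : 0 ≤ i := by omega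
  have h2 : 0 ≤ i - 2 := by omega
  simp only [List.length_cons, if_pos h0, if_pos h2]
  by_cases hlt : i < ((t.length + 1 + 1 : Nat) : Int)
  · have hlt' : i - 2 < (t.length : Int) := by push_cast at hlt ⊢; omega
    simp only [if_pos hlt, if_pos hlt']
    have : i.toNat = (i - 2).toNat + 2 := by omega
    simp [this]
  · have hlt' : ¬ i - 2 < (t.length : Int) := by push_cast at hlt ⊢; omega
    have hle : ¬ i ≤ (t.length : Int) + 1 := by push_cast at hlt; omega
    simp [hlt', hle]

theorem fDecStep_cons_cons (x y : Int) (t : List Int) {i : Int} (h : 2 ≤ i) :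
    fDecStep (x :: y :: t) i = x :: y :: fDecStep t (i - 2) := by
  unfold fDecStep
  rw [pyGetD_cons_cons_of_two_le x y t h,
      PySem.List.pySetD_of_nonneg _ _ (by omega : (0:Int) ≤ i),
      PySem.List.pySetD_of_nonneg _ _ (by omega : (0:Int) ≤ i - 2)]
  have : i.toNat = (i - 2).toNat + 2 := by omega
  simp [this]

theorem foldl_fDecStep_shift (I : List Int) (hI : ∀ i ∈ I, 2 ≤ i) (x y : Int) (t : List Int) :
    I.foldl fDecStep (x :: y :: t) = x :: y :: (I.map (· - 2)).foldl fDecStep t := by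
  induction I generalizing t with
  | nil => simp
  | cons i I ih =>
      have h2 : 2 ≤ i := hI i (by simp)
      simp only [List.foldl_cons, List.map_cons]
      rw [fDecStep_cons_cons x y t h2, ih (fun j hj => hI j (by simp [hj]))]

theorem pyRange_two_cons {a b : Int} (h : a < b) :
    PySem.List.pyRange a b 2 = a :: PySem.List.pyRange (a + 2) b 2 := by
  rw [PySem.List.pyRange_of_pos a b (by omega), PySem.List.pyRange_of_pos (a + 2) b (by omega)]
  have hn : ((b - a + 2 - 1) / 2).toNat = ((b - (a + 2) + 2 - 1) / 2).toNat + 1 := by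
    omega
  by_cases h2 : a + 2 < b
  · simp only [if_pos h, if_pos h2, hn, List.range_succ_eq_map]
    simp only [List.map_cons, List.map_map]
    refine congrArg₂ _ (by ring) (List.map_congr_left fun k _ => by
      simp only [Function.comp_apply]; push_cast; ring)
  · have hone : ((b - a + 2 - 1) / 2).toNat = 1 := by omega
    simp [h, h2, hone, List.range_succ]

theorem map_sub_two_pyRange (b : Int) :
    (PySem.List.pyRange 3 b 2).map (· - 2) = PySem.List.pyRange 1 (b - 2) 2 := by
  rw [PySem.List.pyRange_of_pos 3 b (by omega), PySem.List.pyRange_of_pos 1 (b - 2) (by omega)]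
  by_cases h : 3 < b
  · have h' : 1 < b - 2 := by omega
    have hn : ((b - 3 + 2 - 1) / 2).toNat = ((b - 2 - 1 + 2 - 1) / 2).toNat := by omega
    simp only [if_pos h, if_pos h', hn, List.map_map]
    apply List.map_congr_left
    intro k _
    simp [Function.comp]; ring
  · have h' : ¬ 1 < b - 2 := by omega
    simp [h, h']

theorem fDec_cons_cons (a b : Int) (t : List Int) :
    fDec (a :: b :: t) = a :: (b - 1) :: fDec t := by
  unfold fDec
  have hlen : ((a :: b :: t).length : Int) = (t.length : Int) + 2 := by simp; ring
  rw [hlen, pyRange_two_cons (by omega)]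
  simp only [List.foldl_cons]
  have hstep : fDecStep (a :: b :: t) 1 = a :: (b - 1) :: t := by
    unfold fDecStep
    rw [PySem.List.pySetD_of_nonneg _ _ (by omega : (0:Int) ≤ 1)]
    simp [PySem.List.pyGetD, PySem.List.pyGet?, PySem.List.pyIdx?]
  rw [hstep, foldl_fDecStep_shift _ (fun i hi => by
        have := (PySem.List.mem_pyRange_iff_of_pos (show (0:Int) < 2 by omega) i).mp hi
        omega) a (b - 1) t]
  have h12 : (1 : Int) + 2 = 3 := by omega
  rw [h12, map_sub_two_pyRange]
  have h22 : (t.length : Int) + 2 - 2 = (t.length : Int) := by ring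
  rw [h22]

theorem fResStep_acc (ps : List Int) (I : List Int) :
    ∀ acc, I.foldl (fResStep ps) acc = acc ++ I.foldl (fResStep ps) [] := by
  induction I with
  | nil => simp
  | cons i I ih =>
      intro acc
      simp only [List.foldl_cons]
      rw [ih (fResStep ps acc i), ih (fResStep ps [] i)]
      unfold fResStep
      split_ifs <;> simp

theorem foldl_fResStep_shift (x y : Int) (t : List Int) (I : List Int)
    (hI : ∀ i ∈ I, 2 ≤ i) (acc : List Int) :
    I.foldl (fResStep (x :: y :: t)) acc = (I.map (· - 2)).foldl (fResStep t) acc := by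
  induction I generalizing acc with
  | nil => simp
  | cons i I ih =>
      have h2 : 2 ≤ i := hI i (by simp)
      simp only [List.foldl_cons, List.map_cons]
      have hstep : fResStep (x :: y :: t) acc i = fResStep t acc (i - 2) := by
        unfold fResStep
        rw [pyGetD_cons_cons_of_two_le x y t h2,
            pyGetD_cons_cons_of_two_le x y t (show 2 ≤ i + 1 by omega)]
        have : i + 1 - 2 = i - 2 + 1 := by omega
        rw [this]
      rw [hstep, ih (fun j hj => hI j (by simp [hj]))]

theorem map_sub_two_pyRange_zero (b : Int) :
    (PySem.List.pyRange 2 b 2).map (· - 2) = PySem.List.pyRange 0 (b - 2) 2 := by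
  rw [PySem.List.pyRange_of_pos 2 b (by omega), PySem.List.pyRange_of_pos 0 (b - 2) (by omega)]
  by_cases h : 2 < b
  · have h' : 0 < b - 2 := by omega
    have hn : ((b - 2 + 2 - 1) / 2).toNat = ((b - 2 - 0 + 2 - 1) / 2).toNat := by omega
    simp only [if_pos h, if_pos h', hn, List.map_map]
    apply List.map_congr_left
    intro k _
    simp [Function.comp]
  · have h' : ¬ 0 < b - 2 := by omega
    simp [h]

theorem fRes_cons_cons (x y : Int) (t : List Int) :
    (PySem.List.pyRange 0 ((x :: y :: t).length : Int) 2).foldl (fResStep (x :: y :: t)) []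
      = (if y < 0 then [] else [x, y])
        ++ (PySem.List.pyRange 0 ((t.length : Int)) 2).foldl (fResStep t) [] := by
  have hlen : ((x :: y :: t).length : Int) = (t.length : Int) + 2 := by simp; ring
  rw [hlen, pyRange_two_cons (by omega)]
  simp only [List.foldl_cons]
  have h0 : fResStep (x :: y :: t) [] 0 = if y < 0 then [] else [x, y] := by
    unfold fResStep
    have hx : (0:Int) ≤ (t.length : Int) + 1 := by positivity
    simp [PySem.List.pyGetD, PySem.List.pyGet?, PySem.List.pyIdx?, hx]
  rw [h0, foldl_fResStep_shift x y t _ (fun i hi => by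
        have := (PySem.List.mem_pyRange_iff_of_pos (show (0:Int) < 2 by omega) i).mp hi
        omega)]
  have h02 : (0 : Int) + 2 = 2 := by omega
  rw [h02, map_sub_two_pyRange_zero]
  rw [fResStep_acc]
  have h22 : (t.length : Int) + 2 - 2 = (t.length : Int) := by ring
  rw [h22]

theorem f_cons_cons (a b : Int) (t : List Int) :
    f (a :: b :: t) = (if b - 1 < 0 then [] else [a, b - 1]) ++ f t := by
  show (PySem.List.pyRange 0 ((fDec (a :: b :: t)).length : Int) 2).foldl (fResStep (fDec (a :: b :: t))) []
      = _
  rw [fDec_cons_cons]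
  exact fRes_cons_cons a (b - 1) (fDec t)

-- proof-side helper: the simple pairwise recursion both programs compute
def gRec : List Int → List Int
  | a :: b :: t => (if b - 1 < 0 then [] else [a, b - 1]) ++ gRec t
  | _ => []

theorem gRec_append : ∀ (n : Nat) (l1 l2 : List Int), l1.length ≤ n → l1.length % 2 = 0 →
    gRec (l1 ++ l2) = gRec l1 ++ gRec l2 := by
  intro n
  induction n with
  | zero =>
      intro l1 l2 hlen _
      have : l1 = [] := by cases l1 with | nil => rfl | cons a t => simp at hlen
      subst this; rfl
  | succ n ih =>
      intro l1 l2 hlen hpar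
      match l1 with
      | [] => rfl
      | [a] => simp at hpar
      | a :: b :: t =>
          have ht : t.length ≤ n := by simp at hlen; omega
          have htp : t.length % 2 = 0 := by simp at hpar ⊢; omega
          show gRec (a :: b :: (t ++ l2)) = gRec (a :: b :: t) ++ gRec l2
          simp only [gRec]
          rw [ih t l2 ht htp, List.append_assoc]

theorem fMid_even (m : Nat) : fMid m % 2 = 0 := by
  unfold fMid; split_ifs <;> omega

theorem fAltGo_eq_gRec : ∀ (n : Nat) (ps : List Int), ps.length ≤ n →
    fAltGo n ps = gRec ps := by
  intro n
  induction n with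
  | zero =>
      intro ps hlen
      have : ps = [] := by cases ps with | nil => rfl | cons a t => simp at hlen
      subst this; rfl
  | succ n ih =>
      intro ps hlen
      match ps with
      | [] => rfl
      | [a] => rfl
      | [a, b] => simp [fAltGo, gRec]
      | a :: b :: c :: t =>
          have hlen3 : (a :: b :: c :: t).length = t.length + 3 := by simp
          have hmid1 : 1 ≤ fMid (t.length + 3) := by unfold fMid; split_ifs <;> omega
          have hmidlt : fMid (t.length + 3) < t.length + 3 := by unfold fMid; split_ifs <;> omega
          have htake : ((a :: b :: c :: t).take (fMid (a :: b :: c :: t).length)).length ≤ n := by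
            simp [hlen3]; simp at hlen; omega
          have hdrop : ((a :: b :: c :: t).drop (fMid (a :: b :: c :: t).length)).length ≤ n := by
            simp [hlen3]; simp at hlen; omega
          rw [fAltGo, ih _ htake, ih _ hdrop,
              ← gRec_append (((a :: b :: c :: t).take (fMid (a :: b :: c :: t).length)).length)
                _ _ le_rfl
                (by simp [hlen3]
                    rw [Nat.min_eq_left (by omega)]
                    exact fMid_even _),
              List.take_append_drop]

theorem f_eq_gRec : ∀ (n : Nat) (ps : List Int), ps.length ≤ n → ps.length % 2 = 0 →
    f ps = gRec ps := by
  intro n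
  induction n with
  | zero =>
      intro ps hlen _
      have : ps = [] := by
        cases ps with
        | nil => rfl
        | cons a t => simp at hlen
      subst this
      rfl
  | succ n ih =>
      intro ps hlen hpar
      match ps with
      | [] => rfl
      | [a] => simp at hpar
      | a :: b :: t =>
          have ht : t.length ≤ n := by simp at hlen; omega
          have htp : t.length % 2 = 0 := by simp at hpar ⊢; omega
          rw [f_cons_cons, ih t ht htp]
          rfl

-- ===== VERDICT (by name: the statement is the Claim_ definition above) =====
theorem f_spec : Claim_equal_f := by
  intro params _ hpre
  unfold Spec_f
  rw [f_eq_gRec params.length params le_rfl hpre]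
  exact (fAltGo_eq_gRec params.length params le_rfl).symm
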